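-- pv_equiv track=rewrite | github.com/dwadden/dygiepp | scripts/data/genia/format_genia_sutd.py | make_sentences
-- ===== SOURCE A (Python) =====
-- def make_sentences(lines):
--     sentences = []
--     sentence = []
--     for i, line in enumerate(lines):
--         if i and not i % 4:
--             sentences.append(sentence)
--             sentence = []
--         sentence.append(line.strip())
--     sentences.append(sentence)    # Get the last one.
--     return sentences
-- ===== SOURCE B (Python) =====
-- def make_sentences(lines):
--     stripped = [line.strip() for line in lines]
--     return [stripped[i:i + 4] for i in range(0, len(stripped), 4)]
-- ===== Notes on version B (the rewrite author's own statement) =====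
-- stated objective: idiomatic
-- what changed: Replaces A's per-element fold with an index-and-modulo flush branch by a two-phase strip-then-chunk: build the stripped list once, then take index-stepped slices [stripped[i:i+4] for i in range(0, len(stripped), 4)].
-- intended difference: On the empty input A returns [[]] (its trailing append emits the empty accumulator), while B returns []; an empty line list contains no sentences, so [] is the intended value. — e.g. on make_sentences([]): A returns [[]], B returns []
import Mathlib
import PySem

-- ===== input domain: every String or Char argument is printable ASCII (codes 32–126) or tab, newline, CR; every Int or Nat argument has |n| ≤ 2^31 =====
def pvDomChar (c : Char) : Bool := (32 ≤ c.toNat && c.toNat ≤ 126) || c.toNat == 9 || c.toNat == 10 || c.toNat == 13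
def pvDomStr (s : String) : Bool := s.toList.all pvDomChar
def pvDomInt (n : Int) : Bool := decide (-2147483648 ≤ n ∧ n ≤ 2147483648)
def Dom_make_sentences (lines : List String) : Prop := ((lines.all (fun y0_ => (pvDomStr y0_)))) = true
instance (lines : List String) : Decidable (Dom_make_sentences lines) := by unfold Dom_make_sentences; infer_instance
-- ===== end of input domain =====

-- B replaces A's per-element fold with modulo flush branch by a two-phase strip-then-chunk
-- via index-stepped slices (idiomatic); on the empty input A returns [[]] while B returns [].


-- ===== PORT A =====
def make_sentences (lines : List String) : List (List String) :=
  let st := (PySem.List.enumerate lines).foldl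
    (fun (acc : List (List String) × List String) (p : Int × String) =>
      let fl := if p.1 ≠ 0 ∧ PySem.Int.mod p.1 4 = 0
                then (acc.1 ++ [acc.2], ([] : List String))
                else (acc.1, acc.2)
      (fl.1, fl.2 ++ [PySem.Str.strip p.2]))
    ([], [])
  st.1 ++ [st.2]

-- ===== PORT B =====
def make_sentences_alt (lines : List String) : List (List String) :=
  let stripped := lines.map PySem.Str.strip
  (PySem.List.pyRange 0 (stripped.length : Int) 4).map
    (fun i => PySem.List.slice stripped (some i) (some (i + 4)))

-- ===== PRECONDITION & SPEC =====
-- On the empty input A returns [[]] (the final append emits the empty accumulator);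
-- B returns []; an empty line list contains no sentences, so [] is the intended value.
def D_make_sentences (lines : List String) : Prop := lines = []
instance (lines : List String) : Decidable (D_make_sentences lines) := by unfold D_make_sentences; infer_instance
def Spec_make_sentences (lines : List String) (out : List (List String)) : Prop := ¬ D_make_sentences lines → out = make_sentences_alt lines
instance (lines : List String) (out : List (List String)) : Decidable (Spec_make_sentences lines out) := by unfold Spec_make_sentences; infer_instance
def pvDiffWitness_make_sentences : List String := []
def pvDiffWitnessOut_make_sentences : (List (List String)) × (List (List String)) := ([[]], [])

-- ===== CLAIM (what is proved, stated in full; the proofs are below) =====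
def Claim_unchanged_make_sentences : Prop := ∀ (lines : List String), Dom_make_sentences lines → Spec_make_sentences lines (make_sentences lines)
def Claim_changed_make_sentences : Prop := Dom_make_sentences (pvDiffWitness_make_sentences) ∧ D_make_sentences (pvDiffWitness_make_sentences) ∧ make_sentences (pvDiffWitness_make_sentences) = pvDiffWitnessOut_make_sentences.1 ∧ make_sentences_alt (pvDiffWitness_make_sentences) = pvDiffWitnessOut_make_sentences.2 ∧ pvDiffWitnessOut_make_sentences.1 ≠ pvDiffWitnessOut_make_sentences.2
def Claim_exact_make_sentences : Prop := ∀ (lines : List String), Dom_make_sentences lines → D_make_sentences lines → make_sentences lines ≠ make_sentences_alt lines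

-- ===== LEMMAS AND PROOFS =====

-- reference chunking: successive blocks of four
def chunks4 : List String → List (List String)
  | [] => []
  | x :: rest => (x :: rest.take 3) :: chunks4 (rest.drop 3)
termination_by s => s.length
decreasing_by simp

-- A's accumulator semantics: current partial sentence `cur`, remaining stripped lines
def chunksAux : List String → List String → List (List String)
  | cur, [] => [cur]
  | cur, x :: rest => if cur.length = 4 then cur :: chunksAux [x] rest else chunksAux (cur ++ [x]) rest

lemma mod4_eq (a : Int) : PySem.Int.mod a 4 = a % 4 := by
  simp [PySem.Int.mod, Int.fmod_eq_emod]

lemma chunks4_cons (x : String) (rest : List String) :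
    chunks4 (x :: rest) = (x :: rest).take 4 :: chunks4 ((x :: rest).drop 4) := by
  rw [chunks4]; rfl

lemma chunksAux_eq_chunks4 (rest : List String) : ∀ cur : List String,
    1 ≤ cur.length → cur.length ≤ 4 → chunksAux cur rest = chunks4 (cur ++ rest) := by
  induction rest with
  | nil =>
    intro cur h1 h4
    match cur, h1 with
    | c :: cs, _ =>
      have h3 : cs.length ≤ 3 := by simp at h4; omega
      simp only [chunksAux, List.append_nil]
      rw [chunks4, List.take_of_length_le h3, List.drop_eq_nil_of_le h3, chunks4]
  | cons x rs ih =>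
    intro cur h1 h4
    by_cases hc : cur.length = 4
    · rw [chunksAux.eq_2, if_pos hc]
      rw [ih [x] (by simp) (by simp)]
      match cur, hc with
      | [a, b, c, d], _ =>
        rw [show ([a,b,c,d] : List String) ++ x :: rs = a :: (b :: c :: d :: x :: rs) from rfl, chunks4]
        simp
    · rw [chunksAux.eq_2, if_neg hc]
      rw [ih (cur ++ [x]) (by simp) (by simp; omega)]
      simp

lemma foldA (xs : List String) : ∀ (i : Int) (acc : List (List String)) (cur : List String),
    0 < i → cur.length = ((i - 1) % 4).toNat + 1 →
    (let st := (PySem.List.enumerate xs i).foldl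
        (fun (acc : List (List String) × List String) (p : Int × String) =>
          let fl := if p.1 ≠ 0 ∧ PySem.Int.mod p.1 4 = 0
                    then (acc.1 ++ [acc.2], ([] : List String))
                    else (acc.1, acc.2)
          (fl.1, fl.2 ++ [PySem.Str.strip p.2]))
        (acc, cur)
     st.1 ++ [st.2]) = acc ++ chunksAux cur (xs.map PySem.Str.strip) := by
  induction xs with
  | nil => intro i acc cur _ _; simp [PySem.List.enumerate_nil, chunksAux]
  | cons x rest ih =>
    intro i acc cur hi hlen
    rw [PySem.List.enumerate_cons]
    simp only [List.foldl_cons]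
    by_cases h4 : i % 4 = 0
    · have hcond : i ≠ 0 ∧ PySem.Int.mod i 4 = 0 := ⟨by omega, by rw [mod4_eq]; exact h4⟩
      simp only [if_pos hcond]
      have hc4 : cur.length = 4 := by
        have : (i - 1) % 4 = 3 := by omega
        omega
      have := ih (i + 1) (acc ++ [cur]) [PySem.Str.strip x] (by omega)
        (by simp; omega)
      simp only [List.nil_append] at this ⊢
      rw [this]
      rw [List.map_cons, chunksAux.eq_2, if_pos hc4]
      simp
    · have hcond : ¬ (i ≠ 0 ∧ PySem.Int.mod i 4 = 0) := by
        rw [mod4_eq]; intro ⟨_, h⟩; exact h4 h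
      simp only [if_neg hcond]
      have hc4 : cur.length ≠ 4 := by
        intro h
        have : (i - 1) % 4 = 3 := by omega
        omega
      have := ih (i + 1) acc (cur ++ [PySem.Str.strip x]) (by omega)
        (by simp [hlen]; omega)
      rw [this]
      rw [List.map_cons, chunksAux.eq_2, if_neg hc4]

lemma range_chunks : ∀ (n : Nat) (s : List String), s.length ≤ n →
    (List.range (if (0:Int) < (s.length : Int) then (((s.length : Int) - 0 + 4 - 1) / 4).toNat else 0)).map
      (fun k => (s.drop (4 * k)).take 4) = chunks4 s := by
  intro n
  induction n with
  | zero =>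
    intro s h
    match s, h with
    | [], _ => simp [chunks4]
  | succ n ih =>
    intro s hle
    match s with
    | [] => simp [chunks4]
    | x :: rest =>
      have hpos : (0:Int) < ((x :: rest).length : Int) := by simp
      rw [if_pos hpos]
      set L := (x :: rest).length with hL
      have hm : (((L : Int) - 0 + 4 - 1) / 4).toNat = ((L + 3) / 4 : Nat) := by
        omega
      have hm1 : (L + 3) / 4 = ((L + 3) / 4 - 1) + 1 := by
        have : 1 ≤ (L + 3) / 4 := by simp [hL]; omega
        omega
      rw [hm, hm1, List.range_succ_eq_map]
      simp only [List.map_cons, List.map_map]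
      rw [chunks4_cons]
      congr 1
      have heq : (List.map ((fun k => (List.drop (4 * k) (x :: rest)).take 4) ∘ Nat.succ) (List.range ((L + 3) / 4 - 1)))
          = (List.range ((L + 3) / 4 - 1)).map (fun k => (((x::rest).drop 4).drop (4 * k)).take 4) := by
        apply List.map_congr_left; intro k _
        simp only [Function.comp_def, Nat.succ_eq_add_one]
        rw [List.drop_drop]
        congr 2
        omega
      rw [heq]
      have hL1 : L = rest.length + 1 := by rw [hL]; rfl
      have hrec := ih ((x :: rest).drop 4) (by simp only [List.length_drop]; omega)
      have hdl : (((x :: rest).drop 4).length) = L - 4 := by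
        simp only [List.length_drop]; omega
      have hsz : (if (0:Int) < (((x :: rest).drop 4).length : Int) then (((((x :: rest).drop 4).length : Int) - 0 + 4 - 1) / 4).toNat else 0)
          = (L + 3) / 4 - 1 := by
        rw [hdl]
        by_cases h5 : 5 ≤ L
        · rw [if_pos (by omega)]
          omega
        · rw [if_neg (by omega)]
          omega
      rw [hsz] at hrec
      rw [hrec]

lemma alt_eq_chunks4 (lines : List String) :
    make_sentences_alt lines = chunks4 (lines.map PySem.Str.strip) := by
  unfold make_sentences_alt
  simp only []
  set s := lines.map PySem.Str.strip with hsdef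
  rw [PySem.List.pyRange_of_pos 0 (s.length : Int) (by norm_num)]
  rw [List.map_map]
  rw [← range_chunks s.length s le_rfl]
  apply List.map_congr_left
  intro k hk
  simp only [Function.comp_def]
  have : (0 : Int) + 4 * (k : Int) = ((4 * k : Nat) : Int) := by push_cast; ring
  rw [this]
  have h4 : ((4 * k : Nat) : Int) + 4 = ((4 * k : Nat) : Int) + ((4 : Nat) : Int) := by norm_num
  rw [h4, PySem.List.slice_natCast_add]

-- ===== VERDICT (by name: the statement is the Claim_ definition above) =====
theorem make_sentences_spec : Claim_unchanged_make_sentences := by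
  intro lines _ hD
  match lines, hD with
  | x :: rest, _ =>
    rw [alt_eq_chunks4]
    unfold make_sentences
    rw [PySem.List.enumerate_cons]
    simp only [List.foldl_cons]
    have hcond : ¬ ((0:Int) ≠ 0 ∧ PySem.Int.mod 0 4 = 0) := by simp
    rw [if_neg hcond]
    have := foldA rest 1 [] [PySem.Str.strip x] (by norm_num) (by simp)
    simp only [List.nil_append, zero_add] at this ⊢
    rw [this]
    rw [chunksAux_eq_chunks4 _ [PySem.Str.strip x] (by simp) (by simp)]
    simp

theorem make_sentences_changed : Claim_changed_make_sentences := by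
  unfold Claim_changed_make_sentences; decide

theorem make_sentences_tight : Claim_exact_make_sentences := by
  intro lines _ hD
  subst hD
  decide
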